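-- pv_equiv track=rewrite | github.com/famers-ai/-_AI | backend/app/utils/validation.py | sanitize_text_input
-- ===== SOURCE A (Python) =====
-- def sanitize_text_input(text: str, max_length: int = 1000) -> str:
--     """
--     Sanitize user text input to prevent XSS and other attacks
--     """
--     if not text:
--         return ""
--
--     # Truncate to max length
--     text = text[:max_length]
--
--     # Remove potentially dangerous characters
--     dangerous_chars = ['<', '>', '"', "'", '&', '\x00']
--     for char in dangerous_chars:
--         text = text.replace(char, '')
--
--     # Remove control characters except newlines and tabs
--     text = ''.join(char for char in text if char.isprintable() or char in ['\n', '\t'])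
--
--     return text.strip()
-- ===== SOURCE B (Python) =====
-- DANGEROUS = frozenset('<>"\'&\x00')
--
--
-- def sanitize_text_input(text: str, max_length: int = 1000) -> str:
--     """Single-pass sanitizer: one filtering scan over the truncated text
--     instead of six .replace() passes plus a printable-filter pass."""
--     if not text:
--         return ""
--     cleaned = ''.join(
--         c for c in text[:max_length]
--         if c not in DANGEROUS and (c.isprintable() or c in '\n\t')
--     )
--     return cleaned.strip()
-- ===== Notes on version B (the rewrite author's own statement) =====
-- stated objective: simpler
-- what changed: The six sequential .replace() passes plus a separate printable-filter pass over the truncated text are fused into one character-by-character filtering scan with a single keep-predicate (not dangerous AND (printable or tab/newline)).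
import Mathlib
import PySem

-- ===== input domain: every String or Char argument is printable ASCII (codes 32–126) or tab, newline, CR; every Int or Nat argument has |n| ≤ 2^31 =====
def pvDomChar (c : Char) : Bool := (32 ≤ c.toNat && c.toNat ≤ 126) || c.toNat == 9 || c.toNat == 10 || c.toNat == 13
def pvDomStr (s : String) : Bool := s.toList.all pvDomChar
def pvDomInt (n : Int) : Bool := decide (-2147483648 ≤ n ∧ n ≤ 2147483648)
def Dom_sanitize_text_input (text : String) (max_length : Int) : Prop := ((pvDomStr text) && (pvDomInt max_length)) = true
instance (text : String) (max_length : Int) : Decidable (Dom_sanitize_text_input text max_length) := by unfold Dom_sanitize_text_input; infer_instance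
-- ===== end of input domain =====

-- B fuses A's six .replace() passes and the printable-filter into a single filtering
-- scan with one keep-predicate (objective: simpler — one pass over the truncated text).

-- ===== PORT A =====
-- Python char.isprintable(), exact on the printable-ASCII + tab/newline/CR domain Dom_ admits
def pvPrintableA (c : Char) : Bool := 32 ≤ c.toNat && c.toNat ≤ 126

def sanitize_text_input (text : String) (max_length : Int) : String :=
  if text.toList.isEmpty then "" else
    -- text = text[:max_length]
    let t0 := PySem.Chars.slice text.toList none (some max_length)
    -- for char in dangerous_chars: text = text.replace(char, '')
    let t1 := ['<', '>', '"', '\'', '&', Char.ofNat 0].foldl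
      (fun t ch => PySem.Chars.replace t [ch] []) t0
    -- ''.join(char for char in text if char.isprintable() or char in ['\n', '\t'])
    let t2 := t1.filter (fun ch => pvPrintableA ch || ch == '\n' || ch == '\t')
    String.mk (PySem.Chars.strip t2)

-- ===== PORT B =====
def pvDangerous : List Char := ['<', '>', '"', '\'', '&', Char.ofNat 0]

-- c not in DANGEROUS and (c.isprintable() or c in '\n\t')   (isprintable exact on Dom_'s ASCII)
def pvKeep (c : Char) : Bool :=
  !(pvDangerous.contains c) && ((32 ≤ c.toNat && c.toNat ≤ 126) || c == '\n' || c == '\t')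

def sanitize_text_input_alt (text : String) (max_length : Int) : String :=
  if text.toList.isEmpty then "" else
    String.mk (PySem.Chars.strip
      ((PySem.Chars.slice text.toList none (some max_length)).filter pvKeep))

-- ===== PRECONDITION & SPEC =====
def Spec_sanitize_text_input (text : String) (max_length : Int) (out : String) : Prop := out = sanitize_text_input_alt text max_length
instance (text : String) (max_length : Int) (out : String) : Decidable (Spec_sanitize_text_input text max_length out) := by unfold Spec_sanitize_text_input; infer_instance

-- ===== CLAIM (what is proved, stated in full; the proofs are below) =====
def Claim_equal_sanitize_text_input : Prop := ∀ (text : String) (max_length : Int), Dom_sanitize_text_input text max_length → Spec_sanitize_text_input text max_length (sanitize_text_input text max_length)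

-- ===== LEMMAS AND PROOFS =====

-- PySem.Chars.replace.go with a single-char pattern and empty replacement is a filter.
lemma go_filter (c : Char) : ∀ (fuel : Nat) (l acc : List Char), l.length ≤ fuel →
    PySem.Chars.replace.go [c] [] fuel l acc = acc.reverse ++ l.filter (fun x => !(x == c)) := by
  intro fuel
  induction fuel with
  | zero =>
    intro l acc h
    cases l with
    | nil => simp [PySem.Chars.replace.go]
    | cons a t => simp at h
  | succ n ih =>
    intro l acc h
    cases l with
    | nil => simp [PySem.Chars.replace.go]
    | cons a t =>
      rw [PySem.Chars.replace.go]
      by_cases hac : a = c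
      · subst hac
        simp only [List.isPrefixOf, Bool.and_true, beq_self_eq_true,
          if_pos, List.length_cons, List.drop_succ_cons, List.length_nil, List.drop_zero,
          List.reverse_nil, List.nil_append]
        rw [ih t acc (by simpa using h)]
        simp
      · rw [if_neg (by simp [List.isPrefixOf]; exact Ne.symm hac)]
        rw [ih t (a :: acc) (by simpa using h)]
        simp [hac]

-- text.replace(char, '') deletes exactly the occurrences of char.
lemma replace_filter (t : List Char) (c : Char) :
    PySem.Chars.replace t [c] [] = t.filter (fun x => !(x == c)) := by
  simp [PySem.Chars.replace, go_filter c t.length t [] (le_refl _)]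

-- A's six replace passes followed by its printable-filter equal B's single filter.
lemma filters_fuse (t0 : List Char) :
    ((['<', '>', '"', '\'', '&', Char.ofNat 0].foldl
        (fun t ch => PySem.Chars.replace t [ch] []) t0).filter
      (fun ch => pvPrintableA ch || ch == '\n' || ch == '\t'))
    = t0.filter pvKeep := by
  simp only [List.foldl_cons, List.foldl_nil, replace_filter, List.filter_filter]
  apply List.filter_congr
  intro x _
  by_cases h1 : x = '<'; · subst h1; decide
  by_cases h2 : x = '>'; · subst h2; decide
  by_cases h3 : x = '"'; · subst h3; decide
  by_cases h4 : x = '\''; · subst h4; decide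
  by_cases h5 : x = '&'; · subst h5; decide
  by_cases h6 : x = Char.ofNat 0; · subst h6; decide
  simp [pvKeep, pvDangerous, pvPrintableA, h1, h2, h3, h4, h5, h6]

-- ===== VERDICT (by name: the statement is the Claim_ definition above) =====
theorem sanitize_text_input_spec : Claim_equal_sanitize_text_input := by
  intro text m _
  unfold Spec_sanitize_text_input sanitize_text_input sanitize_text_input_alt
  split
  · rfl
  · simp only [filters_fuse]
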